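-- pv_equiv track=rewrite | github.com/matrix9neonebuchadnezzar2199-sketch/Sacabambaspis | utils/signature.py | extract_signer_name
-- ===== SOURCE A (Python) =====
-- def extract_signer_name(signer_subject):
--     """CN=... から組織名を抽出"""
--     if not signer_subject:
--         return ''
--     for part in signer_subject.split(';'):
--         part = part.strip()
--         if part.upper().startswith('O='):
--             return part[2:].strip().strip('"')
--     for part in signer_subject.split(';'):
--         part = part.strip()
--         if part.upper().startswith('CN='):
--             return part[3:].strip().strip('"')
--     return signer_subject[:60]
-- ===== SOURCE B (Python) =====
-- def extract_signer_name(signer_subject):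
--     """CN=... から組織名を抽出 (single pass: return first O= immediately, remember first CN=)"""
--     if not signer_subject:
--         return ''
--     cn = None
--     for part in signer_subject.split(';'):
--         part = part.strip()
--         if part.upper().startswith('O='):
--             return part[2:].strip().strip('"')
--         if cn is None and part.upper().startswith('CN='):
--             cn = part[3:].strip().strip('"')
--     return cn if cn is not None else signer_subject[:60]
-- ===== Notes on version B (the rewrite author's own statement) =====
-- stated objective: simpler
-- what changed: Replaces A's two full scans of the split parts with a single pass that returns the first O= value immediately and remembers the first CN= value as a fallback accumulator.
import Mathlib
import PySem

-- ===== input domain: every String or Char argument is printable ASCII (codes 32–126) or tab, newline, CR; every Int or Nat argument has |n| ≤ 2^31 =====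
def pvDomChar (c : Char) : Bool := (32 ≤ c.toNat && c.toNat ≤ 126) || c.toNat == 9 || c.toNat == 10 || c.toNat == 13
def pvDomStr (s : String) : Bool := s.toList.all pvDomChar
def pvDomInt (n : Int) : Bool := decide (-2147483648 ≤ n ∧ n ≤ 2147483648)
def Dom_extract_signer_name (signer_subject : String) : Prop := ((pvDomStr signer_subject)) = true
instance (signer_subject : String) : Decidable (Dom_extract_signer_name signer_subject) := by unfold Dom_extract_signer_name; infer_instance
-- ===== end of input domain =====

-- B replaces A's two full scans of the split parts with a single accumulator pass (simpler decomposition, same cost).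


-- ===== PORT A =====
-- first loop of A: return stripped value of the first part whose strip().upper() starts with "O="
def pvALoopO : List String → Option String
  | [] => none
  | p :: rest =>
    let part := PySem.Str.strip p
    if PySem.Str.startswith (PySem.Str.upper part) "O=" then
      some (PySem.Str.stripChars (PySem.Str.strip (PySem.Str.slice part (some 2) none)) "\"")
    else pvALoopO rest

-- second loop of A: same for "CN="
def pvALoopCN : List String → Option String
  | [] => none
  | p :: rest =>
    let part := PySem.Str.strip p
    if PySem.Str.startswith (PySem.Str.upper part) "CN=" then
      some (PySem.Str.stripChars (PySem.Str.strip (PySem.Str.slice part (some 3) none)) "\"")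
    else pvALoopCN rest

def extract_signer_name (signer_subject : String) : String :=
  if signer_subject = "" then ""
  else
    -- split? with the nonempty separator ";" is always `some`; `.getD []` is unreachable
    let parts := (PySem.Str.split? signer_subject ";").getD []
    match pvALoopO parts with
    | some v => v
    | none =>
      match pvALoopCN parts with
      | some v => v
      | none => PySem.Str.slice signer_subject none (some 60)

-- ===== PORT B =====
-- single pass of B: early return on "O=", accumulator `cn` keeps the first "CN=" value
def pvBLoop (s : String) : List String → Option String → String
  | [], cn =>
    match cn with
    | some v => v
    | none => PySem.Str.slice s none (some 60)
  | p :: rest, cn =>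
    let part := PySem.Str.strip p
    if PySem.Str.startswith (PySem.Str.upper part) "O=" then
      PySem.Str.stripChars (PySem.Str.strip (PySem.Str.slice part (some 2) none)) "\""
    else
      pvBLoop s rest
        (if cn.isNone && PySem.Str.startswith (PySem.Str.upper part) "CN=" then
          some (PySem.Str.stripChars (PySem.Str.strip (PySem.Str.slice part (some 3) none)) "\"")
        else cn)

def extract_signer_name_alt (signer_subject : String) : String :=
  if signer_subject = "" then ""
  else pvBLoop signer_subject ((PySem.Str.split? signer_subject ";").getD []) none

-- ===== PRECONDITION & SPEC =====
def Spec_extract_signer_name (signer_subject : String) (out : String) : Prop := out = extract_signer_name_alt signer_subject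
instance (signer_subject : String) (out : String) : Decidable (Spec_extract_signer_name signer_subject out) := by unfold Spec_extract_signer_name; infer_instance

-- ===== CLAIM (what is proved, stated in full; the proofs are below) =====
def Claim_equal_extract_signer_name : Prop := ∀ (signer_subject : String), Dom_extract_signer_name signer_subject → Spec_extract_signer_name signer_subject (extract_signer_name signer_subject)

-- ===== LEMMAS AND PROOFS =====
-- loop invariant: the single pass equals "first O=, else pending cn, else first CN=, else s[:60]"
lemma pvBLoop_eq (s : String) (parts : List String) (cn : Option String) :
    pvBLoop s parts cn =
      match pvALoopO parts with
      | some v => v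
      | none =>
        match cn with
        | some c => c
        | none =>
          match pvALoopCN parts with
          | some v => v
          | none => PySem.Str.slice s none (some 60) := by
  induction parts generalizing cn with
  | nil => cases cn <;> simp [pvBLoop, pvALoopO, pvALoopCN]
  | cons p rest ih =>
    simp only [pvBLoop, pvALoopO, pvALoopCN]
    by_cases hO : PySem.Chars.startswith (PySem.Chars.upper (PySem.Chars.strip p.toList)) ['O', '='] = true
    · simp [hO]
    · cases cn with
      | some c => simp [hO, ih]
      | none =>
        by_cases hCN : PySem.Chars.startswith (PySem.Chars.upper (PySem.Chars.strip p.toList)) ['C', 'N', '='] = true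
        · simp [hO, hCN, ih]
        · simp [hO, hCN, ih]

-- ===== VERDICT (by name: the statement is the Claim_ definition above) =====
theorem extract_signer_name_spec : Claim_equal_extract_signer_name := by
  intro s _
  unfold Spec_extract_signer_name extract_signer_name extract_signer_name_alt
  by_cases h : s = ""
  · simp [h]
  · simp only [h, if_false, pvBLoop_eq]
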